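-- pv_equiv track=rewrite | github.com/bchidamb/FakeBach | markov.py | intMarkov1
-- ===== SOURCE A (Python) =====
-- def intMarkov1(seq):
--     matrix = dict()
--
--     for i in range(len(seq)-1):
--         n1 = seq[i]
--         n2 = seq[i+1]
--
--         if(n1 in matrix):
--             if(n2 in matrix[n1]):
--                 matrix[n1][n2] += 1
--             else:
--                 matrix[n1][n2] = 1
--         else:
--             matrix[n1] = {n2: 1}
--
--     return matrix
-- ===== SOURCE B (Python) =====
-- def intMarkov1(seq):
--     # count adjacent pairs into a flat (n1, n2) -> count table, then reshape
--     counts = {}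
--     for pair in zip(seq, seq[1:]):
--         counts[pair] = counts.get(pair, 0) + 1
--     result = {}
--     for (n1, n2), c in counts.items():
--         result.setdefault(n1, {})[n2] = c
--     return result
-- ===== Notes on version B (the rewrite author's own statement) =====
-- stated objective: alternative
-- what changed: Replaces the single indexed pass with nested membership branching by a count-first reshape-second decomposition: zip adjacent pairs, count them in a flat pair->count dict, then build the nested dict from that table.
import Mathlib
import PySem

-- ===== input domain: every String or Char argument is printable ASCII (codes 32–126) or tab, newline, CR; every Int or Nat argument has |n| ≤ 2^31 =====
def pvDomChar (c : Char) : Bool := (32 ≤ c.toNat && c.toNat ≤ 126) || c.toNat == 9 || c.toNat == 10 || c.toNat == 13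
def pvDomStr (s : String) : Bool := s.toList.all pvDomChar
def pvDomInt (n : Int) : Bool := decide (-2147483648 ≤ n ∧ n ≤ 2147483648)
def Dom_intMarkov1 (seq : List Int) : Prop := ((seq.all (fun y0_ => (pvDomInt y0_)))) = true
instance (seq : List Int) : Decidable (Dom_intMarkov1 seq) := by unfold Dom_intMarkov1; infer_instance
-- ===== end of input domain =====

-- ===== PORT A =====
-- B changes the decomposition (count pairs flat, then reshape); equal cost, no speed claim.
-- helper: the loop body of A (the nested membership branching on the current pair)
def intMarkov1Step (m : PySem.Dict Int (PySem.Dict Int Int)) (n1 n2 : Int) :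
    PySem.Dict Int (PySem.Dict Int Int) :=
  if m.contains n1 then
    if (m.getD n1 PySem.Dict.empty).contains n2 then
      m.insert n1 ((m.getD n1 PySem.Dict.empty).modify n2 0 (· + 1))
    else
      m.insert n1 ((m.getD n1 PySem.Dict.empty).insert n2 1)
  else
    m.insert n1 (PySem.Dict.empty.insert n2 1)

-- indices i and i+1 are always in range, so pyGetD is exact here (Python never raises)
def intMarkov1 (seq : List Int) : List (Int × List (Int × Int)) :=
  let matrix := (PySem.List.pyRange 0 ((seq.length : Int) - 1)).foldl
    (fun m i => intMarkov1Step m (PySem.List.pyGetD seq i 0) (PySem.List.pyGetD seq (i + 1) 0))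
    PySem.Dict.empty
  matrix.items.map (fun p => (p.1, p.2.items))

-- ===== PORT B =====
-- helper: one reshape step, result.setdefault(n1, {})[n2] = c
def reshapeStep (r : PySem.Dict Int (PySem.Dict Int Int)) (pc : (Int × Int) × Int) :
    PySem.Dict Int (PySem.Dict Int Int) :=
  r.insert pc.1.1 ((r.getD pc.1.1 PySem.Dict.empty).insert pc.1.2 pc.2)

def intMarkov1_alt (seq : List Int) : List (Int × List (Int × Int)) :=
  let counts := (seq.zip (seq.drop 1)).foldl
    (fun d p => d.insert p (d.getD p 0 + 1)) PySem.Dict.empty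
  let result := counts.items.foldl reshapeStep PySem.Dict.empty
  result.items.map (fun p => (p.1, p.2.items))

-- ===== PRECONDITION & SPEC =====
def Spec_intMarkov1 (seq : List Int) (out : List (Int × List (Int × Int))) : Prop := out = intMarkov1_alt seq
instance (seq : List Int) (out : List (Int × List (Int × Int))) : Decidable (Spec_intMarkov1 seq out) := by unfold Spec_intMarkov1; infer_instance

-- ===== CLAIM (what is proved, stated in full; the proofs are below) =====
def Claim_equal_intMarkov1 : Prop := ∀ (seq : List Int), Dom_intMarkov1 seq → Spec_intMarkov1 seq (intMarkov1 seq)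

-- ===== LEMMAS AND PROOFS =====

-- the list of adjacent pairs A reads via indices is exactly zip seq (drop 1 seq)
lemma pairs_eq (seq : List Int) :
    (PySem.List.pyRange 0 ((seq.length : Int) - 1)).map
      (fun i => (PySem.List.pyGetD seq i 0, PySem.List.pyGetD seq (i + 1) 0))
    = seq.zip (seq.drop 1) := by
  cases seq with
  | nil => rfl
  | cons x xs =>
    have hlen : (((x :: xs).length : Int) - 1) = (xs.length : Int) := by
      simp
    rw [hlen, PySem.List.pyRange_zero_natCast, List.map_map]
    apply List.ext_getElem
    · simp
    · intro i h1 h2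
      simp only [List.getElem_map, List.getElem_range, Function.comp_apply, List.getElem_zip,
        List.getElem_drop]
      have hi : i < xs.length := by simpa using h1
      rw [PySem.List.pyGetD_eq_getElem _ _ (by positivity) (by simp; omega)]
      have hc : ((i : Int) + 1) = ((i + 1 : Nat) : Int) := by push_cast; ring
      rw [hc, PySem.List.pyGetD_eq_getElem _ _ (by positivity) (by simp; omega)]
      simp [Nat.add_comm]

lemma dict_ext {κ ν : Type} (d1 d2 : PySem.Dict κ ν) (h : d1.items = d2.items) : d1 = d2 := by
  cases d1; cases d2; cases h; rfl

lemma map_repl_of_not_contains {κ ν : Type} [BEq κ] [LawfulBEq κ] (d : PySem.Dict κ ν) (k : κ) (v : ν)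
    (h : d.contains k = false) :
    d.items.map (fun p => if p.1 == k then (k, v) else p) = d.items := by
  have := List.map_congr_left (l := d.items)
    (f := fun p => if p.1 == k then (k, v) else p) (g := id) ?_
  · simpa using this
  · intro q hq
    have hk : (q.1 == k) = false := by
      by_contra hc
      have : q.1 = k := by
        cases hb : (q.1 == k) with
        | true => exact eq_of_beq hb
        | false => exact absurd hb hc
      subst this
      have : d.contains q.1 = true := by
        unfold PySem.Dict.contains
        exact List.any_eq_true.mpr ⟨q, hq, by simp⟩
      simp [this] at h
    simp [hk]

lemma insert_insert_self {κ ν : Type} [BEq κ] [LawfulBEq κ] (d : PySem.Dict κ ν) (k : κ) (a b : ν) :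
    (d.insert k a).insert k b = d.insert k b := by
  apply dict_ext
  by_cases h : d.contains k = true
  · rw [PySem.Dict.items_insert, PySem.Dict.items_insert, PySem.Dict.items_insert]
    simp [h, PySem.Dict.contains_insert_self, List.map_map]
    intro a1 b1 _
    by_cases hk : (a1 == k) = true <;> simp [hk]
  · rw [PySem.Dict.items_insert, PySem.Dict.items_insert, PySem.Dict.items_insert]
    have h' : d.contains k = false := by simpa using h
    simp [h', PySem.Dict.contains_insert_self, List.map_append, map_repl_of_not_contains _ _ _ h']

lemma insert_comm_of_contains {κ ν : Type} [BEq κ] [LawfulBEq κ] (d : PySem.Dict κ ν) (k1 k2 : κ)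
    (v1 v2 : ν) (hne : k1 ≠ k2) (h1 : d.contains k1 = true) :
    (d.insert k1 v1).insert k2 v2 = (d.insert k2 v2).insert k1 v1 := by
  have hb12 : (k1 == k2) = false := by simpa using hne
  have hb21 : (k2 == k1) = false := by simpa using (Ne.symm hne)
  have hc1 : (d.insert k2 v2).contains k1 = true := by
    rw [PySem.Dict.contains_insert]; simp [h1]
  apply dict_ext
  by_cases h2 : d.contains k2 = true
  · have hc2 : (d.insert k1 v1).contains k2 = true := by
      rw [PySem.Dict.contains_insert]; simp [h2]
    rw [PySem.Dict.items_insert, PySem.Dict.items_insert, PySem.Dict.items_insert,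
      PySem.Dict.items_insert]
    simp only [hc2, hc1, h1, h2, if_true, List.map_map]
    apply List.map_congr_left
    intro q _
    by_cases hq1 : (q.1 == k1) = true
    · have : q.1 = k1 := eq_of_beq hq1
      simp [Function.comp, this, hb12]
    · by_cases hq2 : (q.1 == k2) = true
      · have : q.1 = k2 := eq_of_beq hq2
        simp [Function.comp, this, hb21]
      · simp [Function.comp, hq1, hq2]
  · have h2' : d.contains k2 = false := by simpa using h2
    have hc2 : (d.insert k1 v1).contains k2 = false := by
      rw [PySem.Dict.contains_insert]; simp [h2', hb21]
    rw [PySem.Dict.items_insert, PySem.Dict.items_insert, PySem.Dict.items_insert,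
      PySem.Dict.items_insert]
    simp [hc2, hc1, h1, h2', List.map_append, hb21]


lemma reshape_contains (l : List ((Int × Int) × Int)) (r : PySem.Dict Int (PySem.Dict Int Int))
    (n1 n2 : Int) :
    (((l.foldl reshapeStep r).getD n1 PySem.Dict.empty).contains n2 = true) ↔
      ((n1, n2) ∈ l.map Prod.fst ∨ ((r.getD n1 PySem.Dict.empty).contains n2 = true)) := by
  induction l generalizing r with
  | nil => simp
  | cons q t ih =>
    obtain ⟨⟨m1, m2⟩, c⟩ := q
    rw [List.foldl_cons, ih]
    by_cases h : n1 = m1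
    · subst h
      simp [reshapeStep, PySem.Dict.getD_insert_self, PySem.Dict.contains_insert, Prod.ext_iff]
      tauto
    · simp [reshapeStep, PySem.Dict.getD_insert, h, Prod.ext_iff]

lemma reshape_getD_of_not_mem (l : List ((Int × Int) × Int)) (r : PySem.Dict Int (PySem.Dict Int Int))
    (n1 n2 : Int) (h : (n1, n2) ∉ l.map Prod.fst) :
    ((l.foldl reshapeStep r).getD n1 PySem.Dict.empty).getD n2 0
      = ((r.getD n1 PySem.Dict.empty).getD n2 0) := by
  induction l generalizing r with
  | nil => rfl
  | cons q t ih =>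
    obtain ⟨⟨m1, m2⟩, c⟩ := q
    simp only [List.map_cons, List.mem_cons, not_or, Prod.ext_iff] at h
    rw [List.foldl_cons, ih _ (by simpa [Prod.ext_iff] using h.2)]
    by_cases he : n1 = m1
    · subst he
      have hm2 : n2 ≠ m2 := fun hc => h.1 ⟨rfl, hc⟩
      simp [reshapeStep, PySem.Dict.getD_insert_self, PySem.Dict.getD_insert, hm2]
    · simp [reshapeStep, PySem.Dict.getD_insert, he]

lemma reshape_getD_of_mem (l : List ((Int × Int) × Int)) (r : PySem.Dict Int (PySem.Dict Int Int))
    (n1 n2 : Int) (v : Int) (hmem : ((n1, n2), v) ∈ l) (hnd : (l.map Prod.fst).Nodup) :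
    ((l.foldl reshapeStep r).getD n1 PySem.Dict.empty).getD n2 0 = v := by
  induction l generalizing r with
  | nil => simp at hmem
  | cons q t ih =>
    rw [List.map_cons] at hnd
    rcases List.mem_cons.mp hmem with hq | ht
    · subst hq
      rw [List.foldl_cons, reshape_getD_of_not_mem _ _ _ _ (by simpa using (List.nodup_cons.mp hnd).1)]
      simp [reshapeStep, PySem.Dict.getD_insert_self]
    · rw [List.foldl_cons]
      exact ih _ ht (List.nodup_cons.mp hnd).2

lemma reshape_patch (t : List ((Int × Int) × Int)) (r : PySem.Dict Int (PySem.Dict Int Int))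
    (n1 n2 v : Int) (h1 : r.contains n1 = true)
    (h2 : (r.getD n1 PySem.Dict.empty).contains n2 = true)
    (hnm : (n1, n2) ∉ t.map Prod.fst) :
    t.foldl reshapeStep (r.insert n1 ((r.getD n1 PySem.Dict.empty).insert n2 v))
      = (t.foldl reshapeStep r).insert n1
          (((t.foldl reshapeStep r).getD n1 PySem.Dict.empty).insert n2 v) := by
  induction t generalizing r with
  | nil => rfl
  | cons q t ih =>
    obtain ⟨⟨m1, m2⟩, c⟩ := q
    simp only [List.map_cons, List.mem_cons, not_or, Prod.ext_iff] at hnm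
    rw [List.foldl_cons, List.foldl_cons]
    have hcomm : reshapeStep (r.insert n1 ((r.getD n1 PySem.Dict.empty).insert n2 v)) ((m1, m2), c)
        = (reshapeStep r ((m1, m2), c)).insert n1
            (((reshapeStep r ((m1, m2), c)).getD n1 PySem.Dict.empty).insert n2 v) := by
      by_cases he : n1 = m1
      · subst he
        have hm2 : n2 ≠ m2 := fun hc => hnm.1 ⟨rfl, hc⟩
        simp only [reshapeStep, PySem.Dict.getD_insert_self]
        rw [insert_insert_self, insert_insert_self,
          insert_comm_of_contains (r.getD n1 PySem.Dict.empty) n2 m2 v c hm2 h2]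
      · simp only [reshapeStep, PySem.Dict.getD_insert, if_neg he, if_neg (fun hc : m1 = n1 => he hc.symm)]
        exact insert_comm_of_contains r n1 m1 _ _ he h1
    rw [hcomm]
    have h1' : (reshapeStep r ((m1, m2), c)).contains n1 = true := by
      rw [reshapeStep, PySem.Dict.contains_insert]; simp [h1]
    have h2' : ((reshapeStep r ((m1, m2), c)).getD n1 PySem.Dict.empty).contains n2 = true := by
      by_cases he : n1 = m1
      · subst he
        rw [reshapeStep, PySem.Dict.getD_insert_self, PySem.Dict.contains_insert]
        simp [h2]
      · rw [reshapeStep]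
        rw [PySem.Dict.getD_insert]
        simp only [if_neg he]
        exact h2
    exact ih _ h1' h2' (by simpa [Prod.ext_iff] using hnm.2)

lemma map_bump_eq_self (t : List ((Int × Int) × Int)) (p : Int × Int) (v : Int)
    (h : p ∉ t.map Prod.fst) :
    t.map (fun q => if q.1 == p then (p, v) else q) = t := by
  have : ∀ q ∈ t, (fun q => if q.1 == p then (p, v) else q) q = id q := by
    intro q hq
    have : (q.1 == p) = false := by
      simp only [beq_eq_false_iff_ne, ne_eq]
      intro hc
      exact h (hc ▸ List.mem_map_of_mem hq)
    simp [this]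
  rw [List.map_congr_left this, List.map_id]

lemma reshape_map_bump (l : List ((Int × Int) × Int)) (r : PySem.Dict Int (PySem.Dict Int Int))
    (p : Int × Int) (v : Int) (hmem : p ∈ l.map Prod.fst) (hnd : (l.map Prod.fst).Nodup) :
    (l.map (fun q => if q.1 == p then (p, v) else q)).foldl reshapeStep r
      = (l.foldl reshapeStep r).insert p.1
          (((l.foldl reshapeStep r).getD p.1 PySem.Dict.empty).insert p.2 v) := by
  induction l generalizing r with
  | nil => simp at hmem
  | cons q t ih =>
    rw [List.map_cons] at hnd ⊢
    by_cases hq : (q.1 == p) = true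
    · have hqp : q.1 = p := eq_of_beq hq
      have hnm : p ∉ t.map Prod.fst := hqp ▸ (List.nodup_cons.mp hnd).1
      rw [if_pos hq, List.foldl_cons, List.foldl_cons, map_bump_eq_self t p v hnm]
      have h1 : (reshapeStep r q).contains p.1 = true := by
        rw [reshapeStep, ← hqp]; exact PySem.Dict.contains_insert_self _ _ _
      have h2 : ((reshapeStep r q).getD p.1 PySem.Dict.empty).contains p.2 = true := by
        rw [reshapeStep, ← hqp, PySem.Dict.getD_insert_self]
        exact PySem.Dict.contains_insert_self _ _ _
      rw [← reshape_patch t (reshapeStep r q) p.1 p.2 v h1 h2 hnm]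
      congr 1
      have hq2 : q = (p, q.2) := by rw [← hqp]
      rw [hq2, reshapeStep, reshapeStep, PySem.Dict.getD_insert_self, insert_insert_self,
        insert_insert_self]
    · have hne : p ≠ q.1 := fun hc => hq (by simp [hc])
      have hmem' : p ∈ t.map Prod.fst := by
        rcases List.mem_cons.mp hmem with h | h
        · exact absurd h.symm hne.symm
        · exact h
      rw [if_neg hq, List.foldl_cons, List.foldl_cons]
      exact ih _ hmem' (List.nodup_cons.mp hnd).2


lemma fold_eq_reshape_counter (ps : List (Int × Int)) :
    ps.foldl (fun m p => intMarkov1Step m p.1 p.2) PySem.Dict.empty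
      = (PySem.Dict.counter ps).items.foldl reshapeStep PySem.Dict.empty := by
  induction ps using List.reverseRecOn with
  | nil => rfl
  | append_singleton ps p ih =>
    rw [List.foldl_append, List.foldl_cons, List.foldl_nil, ih,
      PySem.Dict.counter_append_singleton]
    set c := PySem.Dict.counter ps with hc
    set M := c.items.foldl reshapeStep PySem.Dict.empty with hM
    have hcont : ((M.getD p.1 PySem.Dict.empty).contains p.2 = true) ↔ p ∈ c.keys := by
      rw [reshape_contains]
      simp [PySem.Dict.getD_empty, PySem.Dict.contains_empty, PySem.Dict.keys]
    have hnd : (c.items.map Prod.fst).Nodup := PySem.Dict.nodup_keys_counter ps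
    rw [PySem.Dict.modify]
    by_cases hp : c.contains p = true
    · -- existing pair: values bumped in place
      have hmemk : p ∈ c.keys := (PySem.Dict.contains_iff_mem_keys c p).mp hp
      have hinner : (M.getD p.1 PySem.Dict.empty).contains p.2 = true := hcont.mpr hmemk
      have hm1 : M.contains p.1 = true := by
        by_contra h
        rw [PySem.Dict.getD_of_not_contains _ _ (by simpa using h)] at hinner
        simp [PySem.Dict.contains_empty] at hinner
      have hval : (M.getD p.1 PySem.Dict.empty).getD p.2 0 = (List.count p ps : Int) := by
        apply reshape_getD_of_mem _ _ _ _ _ _ hnd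
        have : p ∈ PySem.Set.ofList ps := by
          rw [← PySem.Dict.keys_counter]; exact hmemk
        have := List.mem_map_of_mem (f := fun k => (k, (List.count k ps : Int))) this
        rw [← PySem.Dict.items_counter] at this
        simpa using this
      have hitems : (c.insert p (c.getD p 0 + 1)).items
          = c.items.map (fun q => if q.1 == p then (p, c.getD p 0 + 1) else q) := by
        rw [PySem.Dict.items_insert, if_pos hp]
      rw [hitems, reshape_map_bump _ _ _ _ (by simpa [PySem.Dict.keys] using hmemk) hnd]
      rw [intMarkov1Step, if_pos hm1, if_pos hinner, PySem.Dict.modify, hval,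
        PySem.Dict.getD_counter]
    · -- new pair: appended with count 1
      have hinner : (M.getD p.1 PySem.Dict.empty).contains p.2 = false := by
        rw [← Bool.not_eq_true]
        intro h
        exact hp ((PySem.Dict.contains_iff_mem_keys c p).mpr (hcont.mp h))
      have hitems : (c.insert p (c.getD p 0 + 1)).items = c.items ++ [(p, (0 : Int) + 1)] := by
        rw [PySem.Dict.items_insert, if_neg hp,
          PySem.Dict.getD_of_not_contains _ _ (by simpa using hp)]
      rw [hitems, List.foldl_append, List.foldl_cons, List.foldl_nil]
      rw [intMarkov1Step, reshapeStep]
      by_cases hm1 : M.contains p.1 = true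
      · rw [if_pos hm1, if_neg (by simp [hinner]), show ((0 : Int) + 1) = 1 by norm_num]
      · rw [if_neg hm1, PySem.Dict.getD_of_not_contains _ _ (by simpa using hm1),
          show ((0 : Int) + 1) = 1 by norm_num]

-- ===== VERDICT (by name: the statement is the Claim_ definition above) =====
theorem intMarkov1_spec : Claim_equal_intMarkov1 := by
  intro seq _
  show intMarkov1 seq = intMarkov1_alt seq
  unfold intMarkov1 intMarkov1_alt
  have h1 : (PySem.List.pyRange 0 ((seq.length : Int) - 1)).foldl
      (fun m i => intMarkov1Step m (PySem.List.pyGetD seq i 0) (PySem.List.pyGetD seq (i + 1) 0))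
      PySem.Dict.empty
      = (seq.zip (seq.drop 1)).foldl (fun m p => intMarkov1Step m p.1 p.2) PySem.Dict.empty := by
    rw [← pairs_eq seq, List.foldl_map]
  rw [h1, fold_eq_reshape_counter, PySem.Dict.foldl_insert_getD_add_one_eq_counter]
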